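-- pv_equiv track=rewrite | github.com/AV3S-NTF/Logia | etap3/Ex4_LOGIA17.py | recurrent
-- ===== SOURCE A (Python) =====
-- def recurrent(record, competitors):
--     if (len(competitors) == 1):
--         return competitors[0]
--     else:
--         smallest = record[0][0]
--         smallestI = 0
--         nCompetitors = []
--         for i in range(0, len(record[0])):
--             if (record[0][i] < smallest):
--                 smallest = record[0][i]
--                 smallestI = i
--         for i in range(0, len(record[0])):
--             if (i != smallestI):
--                 nCompetitors.append(competitors[i])
--         return recurrent(record[1:], nCompetitors)
-- ===== SOURCE B (Python) =====
-- def recurrent(record, competitors):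
--     comps = list(competitors)
--     k = 0
--     while len(comps) > 1:
--         row = record[k]
--         smallestI = 0
--         for i in range(1, len(row)):
--             if row[i] < row[smallestI]:
--                 smallestI = i
--         comps = [comps[i] for i in range(len(row)) if i != smallestI]
--         k += 1
--     return comps[0]
-- ===== Notes on version B (the rewrite author's own statement) =====
-- stated objective: idiomatic
-- what changed: Replaced A's tail recursion (which copies record[1:] on every round) with an explicit while loop over the rows by index, a min-index scan starting from 1, and a list comprehension for the elimination.
import Mathlib
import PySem

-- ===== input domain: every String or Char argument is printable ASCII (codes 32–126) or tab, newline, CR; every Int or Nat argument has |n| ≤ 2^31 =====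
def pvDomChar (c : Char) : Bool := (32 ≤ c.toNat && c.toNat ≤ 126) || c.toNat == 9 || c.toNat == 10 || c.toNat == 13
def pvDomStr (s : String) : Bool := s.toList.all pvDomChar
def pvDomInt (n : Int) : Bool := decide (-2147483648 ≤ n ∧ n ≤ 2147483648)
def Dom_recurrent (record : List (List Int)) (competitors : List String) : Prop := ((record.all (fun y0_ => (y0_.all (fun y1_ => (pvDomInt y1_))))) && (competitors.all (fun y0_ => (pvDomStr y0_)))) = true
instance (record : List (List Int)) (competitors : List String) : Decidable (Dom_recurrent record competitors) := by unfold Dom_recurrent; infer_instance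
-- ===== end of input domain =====

-- B replaces A's tail recursion (which reslices record[1:] each round) with an explicit
-- while loop over the rows by index and a list comprehension for the elimination (idiomatic).

-- ===== PORT A =====
-- literal transliteration of A: recursion on record, the two index for-loops as foldl over
-- List.range (range(0, n)); in-range list indexing is List.getD (always in range inside Pre_;
-- "" / 0 defaults are only reached where Python raises IndexError, outside Pre_)
def recurrent (record : List (List Int)) (competitors : List String) : String :=
  if competitors.length == 1 then
    competitors.getD 0 ""
  else
    match record with
    | [] => ""  -- record[0] raises IndexError in Python (excluded by Pre_)
    | row :: rest =>
      let sp := (List.range row.length).foldl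
        (fun sp i => if row.getD i 0 < sp.1 then (row.getD i 0, i) else sp)
        (row.getD 0 0, 0)
      let nCompetitors := (List.range row.length).foldl
        (fun acc i => if i ≠ sp.2 then acc ++ [competitors.getD i ""] else acc) []
      recurrent rest nCompetitors

-- ===== PORT B =====
-- B's while loop over record[k], k = 0,1,…, carrying the shrinking comps list
def recurrentAltLoop (rows : List (List Int)) (comps : List String) : List String :=
  if comps.length ≤ 1 then comps
  else
    match rows with
    | [] => comps  -- record[k] raises IndexError in Python (excluded by Pre_)
    | row :: rest =>
      let smallestI := (List.range' 1 (row.length - 1)).foldl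
        (fun si i => if row.getD i 0 < row.getD si 0 then i else si) 0
      recurrentAltLoop rest
        (((List.range row.length).filter (fun i => decide (i ≠ smallestI))).map
          (fun i => comps.getD i ""))

def recurrent_alt (record : List (List Int)) (competitors : List String) : String :=
  (recurrentAltLoop record competitors).getD 0 ""

-- ===== PRECONDITION & SPEC =====
-- the number of competitors A's round k starts with, read off the input lengths: the first round
-- starts with all competitors, round k+1 with one fewer than row k has scores
def pvCnt (record : List (List Int)) (competitors : List String) (k : Nat) : Nat :=
  if k = 0 then competitors.length else (record.getD (k - 1) []).length - 1

-- the index of the first minimum of a row (A's strict-< scan keeps the first minimal element)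
def pvArgmin (row : List Int) : Nat := row.idxOf (row.foldl min (row.getD 0 0))

-- Pre_ excludes EXACTLY the inputs on which Python A raises IndexError: it holds iff some round m
-- starts with a single competitor and every earlier round k has a nonempty score row that indexes
-- only existing competitors — its length is at most the competitor count of round k, or exceeds it
-- by exactly one with the row's first minimum sitting at that extra index (so the out-of-range
-- index is the one being skipped).  Wherever A returns, Pre_ holds and B returns the same value.
def Pre_recurrent (record : List (List Int)) (competitors : List String) : Prop :=
  ∃ m ≤ record.length, pvCnt record competitors m = 1 ∧
    ∀ k < m, 1 ≤ (record.getD k []).length ∧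
      ((record.getD k []).length ≤ pvCnt record competitors k ∨
       ((record.getD k []).length = pvCnt record competitors k + 1 ∧
        pvArgmin (record.getD k []) = pvCnt record competitors k))
instance (record : List (List Int)) (competitors : List String) : Decidable (Pre_recurrent record competitors) := by unfold Pre_recurrent; infer_instance

def pvWitness_recurrent : List (List Int) × List String :=
  ([[3, 1, 2], [5, 4]], ["a", "b", "c"])

def Spec_recurrent (record : List (List Int)) (competitors : List String) (out : String) : Prop := out = recurrent_alt record competitors
instance (record : List (List Int)) (competitors : List String) (out : String) : Decidable (Spec_recurrent record competitors out) := by unfold Spec_recurrent; infer_instance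

-- ===== CLAIM (what is proved, stated in full; the proofs are below) =====
def Claim_equal_recurrent : Prop := ∀ (record : List (List Int)) (competitors : List String), Dom_recurrent record competitors → Pre_recurrent record competitors → Spec_recurrent record competitors (recurrent record competitors)

-- ===== LEMMAS AND PROOFS =====

-- A's packed (value, index) min-fold equals B's index-only min-fold, packed afterwards.
theorem minFold_pack (row : List Int) (l : List Nat) (si : Nat) :
    l.foldl (fun sp i => if row.getD i 0 < sp.1 then (row.getD i 0, i) else sp)
      (row.getD si 0, si)
      = (row.getD (l.foldl (fun sj i => if row.getD i 0 < row.getD sj 0 then i else sj) si) 0,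
         l.foldl (fun sj i => if row.getD i 0 < row.getD sj 0 then i else sj) si) := by
  induction l generalizing si with
  | nil => rfl
  | cons i t ih =>
    simp only [List.foldl_cons]
    by_cases h : row.getD i 0 < row.getD si 0
    · simp only [if_pos h]; exact ih i
    · simp only [if_neg h]; exact ih si

-- the index min-fold stays below n
theorem minFold_lt (row : List Int) (l : List Nat) (si n : Nat)
    (hsi : si < n) (hl : ∀ i ∈ l, i < n) :
    l.foldl (fun sj i => if row.getD i 0 < row.getD sj 0 then i else sj) si < n := by
  induction l generalizing si with
  | nil => exact hsi
  | cons i t ih =>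
    simp only [List.foldl_cons]
    by_cases h : row.getD i 0 < row.getD si 0
    · simp only [if_pos h]
      exact ih i (hl i (by simp)) (fun j hj => hl j (by simp [hj]))
    · simp only [if_neg h]
      exact ih si hsi (fun j hj => hl j (by simp [hj]))

-- removing one index s < n from range n leaves n - 1 indices
theorem length_filter_ne_range (n s : Nat) (hs : s < n) :
    ((List.range n).filter (fun i => decide (i ≠ s))).length = n - 1 := by
  induction n with
  | zero => omega
  | succ m ih =>
    rw [List.range_succ, List.filter_append, List.length_append]
    by_cases hm : s = m
    · have hall : (List.range m).filter (fun i => decide (i ≠ s)) = List.range m :=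
        List.filter_eq_self.mpr (by
          intro a ha
          simp only [List.mem_range] at ha
          simp only [decide_eq_true_eq]
          omega)
      have h1 : ([m].filter (fun i => decide (i ≠ s))).length = 0 := by
        subst hm; simp
      rw [hall, h1, List.length_range]
      omega
    · have h1 : ([m].filter (fun i => decide (i ≠ s))).length = 1 := by
        simp only [List.filter_cons, List.filter_nil]
        rw [if_pos (by simp only [decide_eq_true_eq]; omega)]
        rfl
      rw [ih (by omega), h1]
      omega

-- the single step: A's round body produces exactly B's round body
theorem elimRound_eq (row : List Int) (comps : List String) (hrow : 1 ≤ row.length) :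
    (List.range row.length).foldl
        (fun acc i => if i ≠ ((List.range row.length).foldl
            (fun sp i => if row.getD i 0 < sp.1 then (row.getD i 0, i) else sp)
            (row.getD 0 0, 0)).2 then acc ++ [comps.getD i ""] else acc) []
      = ((List.range row.length).filter (fun i =>
            decide (i ≠ (List.range' 1 (row.length - 1)).foldl
              (fun si i => if row.getD i 0 < row.getD si 0 then i else si) 0))).map
          (fun i => comps.getD i "") := by
  have hsplit : List.range row.length = 0 :: List.range' 1 (row.length - 1) := by
    rw [List.range_eq_range']
    cases h : row.length with
    | zero => omega
    | succ m => simp [List.range'_succ]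
  have hA : ((List.range row.length).foldl
      (fun sp i => if row.getD i 0 < sp.1 then (row.getD i 0, i) else sp)
      (row.getD 0 0, 0)).2
      = (List.range' 1 (row.length - 1)).foldl
          (fun si i => if row.getD i 0 < row.getD si 0 then i else si) 0 := by
    rw [hsplit]
    simp only [List.foldl_cons, lt_irrefl, if_false]
    rw [minFold_pack row _ 0]
  rw [hA]
  exact PySem.List.foldl_append_ite (fun i => i ≠ _) (fun i => comps.getD i "") _ _

-- peeling one row shifts pvCnt by one
theorem pvCnt_shift (row : List Int) (rest : List (List Int)) (comps comps' : List String)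
    (hlen : comps'.length = row.length - 1) (k : Nat) :
    pvCnt rest comps' k = pvCnt (row :: rest) comps (k + 1) := by
  cases k with
  | zero => simp [pvCnt, hlen]
  | succ j => simp [pvCnt]

-- under Pre_'s constraints, the current competitor list is nonempty
theorem cnt0_pos (m : Nat) :
    ∀ (rows : List (List Int)) (comps : List String), m ≤ rows.length →
      pvCnt rows comps m = 1 →
      (∀ k < m, 1 ≤ (rows.getD k []).length ∧
        ((rows.getD k []).length ≤ pvCnt rows comps k ∨
         ((rows.getD k []).length = pvCnt rows comps k + 1 ∧
          pvArgmin (rows.getD k []) = pvCnt rows comps k))) →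
      1 ≤ comps.length := by
  induction m with
  | zero =>
    intro rows comps _ hcnt _
    simp [pvCnt] at hcnt
    omega
  | succ m ih =>
    intro rows comps hm hcnt hcon
    by_cases h0 : 1 ≤ comps.length
    · exact h0
    · exfalso
      cases rows with
      | nil => simp at hm
      | cons row rest =>
        have hcon0 := hcon 0 (by omega)
        simp [pvCnt] at hcon0
        have hrow1 : row.length = 1 := by
          rcases hcon0.2 with h | h
          · omega
          · omega
        have hlen : ([] : List String).length = row.length - 1 := by simp [hrow1]
        refine absurd (ih rest [] (by simpa using hm) ?_ ?_) (by simp)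
        · rw [pvCnt_shift row rest comps [] hlen]; exact hcnt
        · intro k hk
          have := hcon (k + 1) (by omega)
          simpa [pvCnt_shift row rest comps [] hlen k] using this

-- main loop invariant: whenever elimination reaches a single competitor at round m,
-- A's recursion equals B's loop followed by [0]
theorem main_eq (m : Nat) :
    ∀ (rows : List (List Int)) (comps : List String), m ≤ rows.length →
      pvCnt rows comps m = 1 →
      (∀ k < m, 1 ≤ (rows.getD k []).length ∧
        ((rows.getD k []).length ≤ pvCnt rows comps k ∨
         ((rows.getD k []).length = pvCnt rows comps k + 1 ∧
          pvArgmin (rows.getD k []) = pvCnt rows comps k))) →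
      recurrent rows comps = (recurrentAltLoop rows comps).getD 0 "" := by
  induction m with
  | zero =>
    intro rows comps _ hcnt _
    have hone : comps.length = 1 := by simpa [pvCnt] using hcnt
    cases rows with
    | nil => rw [recurrent, recurrentAltLoop]; simp [hone]
    | cons row rest => rw [recurrent, recurrentAltLoop]; simp [hone]
  | succ m ih =>
    intro rows comps hm hcnt hcon
    by_cases hone : comps.length = 1
    · cases rows with
      | nil => rw [recurrent, recurrentAltLoop]; simp [hone]
      | cons row rest => rw [recurrent, recurrentAltLoop]; simp [hone]
    · cases rows with
      | nil => simp at hm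
      | cons row rest =>
        have hpos : 1 ≤ comps.length := cnt0_pos (m + 1) (row :: rest) comps hm hcnt hcon
        have h2' : 2 ≤ comps.length := by omega
        have hcon0 := hcon 0 (by omega)
        simp [pvCnt] at hcon0
        have hrow1 : 1 ≤ row.length := hcon0.1
        rw [recurrent, recurrentAltLoop]
        simp only [if_neg (by simp [hone] : ¬ (comps.length == 1) = true),
          if_neg (by omega : ¬ comps.length ≤ 1)]
        rw [elimRound_eq row comps hrow1]
        set s := (List.range' 1 (row.length - 1)).foldl
          (fun si i => if row.getD i 0 < row.getD si 0 then i else si) 0 with hs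
        set comps' := ((List.range row.length).filter (fun i => decide (i ≠ s))).map
          (fun i => comps.getD i "") with hc
        have hslt : s < row.length := by
          apply minFold_lt row _ 0 row.length (by omega)
          intro i hi
          have := List.mem_range'.mp hi
          omega
        have hlen : comps'.length = row.length - 1 := by
          rw [hc, List.length_map, length_filter_ne_range _ _ hslt]
        apply ih rest comps'
        · simpa using hm
        · rw [pvCnt_shift row rest comps comps' hlen]
          exact hcnt
        · intro k hk
          have := hcon (k + 1) (by omega)
          simpa [pvCnt_shift row rest comps comps' hlen k] using this

-- ===== VERDICT (by name: the statement is the Claim_ definition above) =====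
theorem recurrent_spec : Claim_equal_recurrent := by
  intro record competitors _ hpre
  unfold Spec_recurrent recurrent_alt
  obtain ⟨m, hm, hcnt, hcon⟩ := hpre
  exact main_eq m record competitors hm hcnt hcon
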